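-- pv_equiv track=rewrite | github.com/koba925/alds | atcoder/ABC072/C.py | together
-- ===== SOURCE A (Python) =====
-- def together(N, A):
--     counts = [0] * 100000
--     for a in A:
--         if a > 0:
--             counts[a - 1] += 1
--         counts[a] += 1
--         if a < 99999:
--             counts[a + 1] += 1
--     return max(counts)
-- ===== SOURCE B (Python) =====
-- def together(N, A):
--     # Sort-and-sweep: the answer is the size of the largest group of elements that
--     # fits in an interval of width 2, found by a two-pointer sweep over sorted(A)
--     # (no 100000-slot counting table at all).
--     s = sorted(A)
--     best = 0
--     l = 0
--     for r in range(len(s)):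
--         while s[r] - s[l] > 2:
--             l += 1
--         best = max(best, r - l + 1)
--     return best
-- ===== Notes on version B (the rewrite author's own statement) =====
-- stated objective: alternative
-- what changed: A scatters every element into three neighbouring slots of a 100000-entry counting table and returns max(table); B sorts the list and runs a two-pointer sliding-window sweep that finds the largest group of elements spanning at most 2, with no counting table.
-- outside the precondition, e.g. on together(2, [-1, 99999]): A returns 2, B returns 1
import Mathlib
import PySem

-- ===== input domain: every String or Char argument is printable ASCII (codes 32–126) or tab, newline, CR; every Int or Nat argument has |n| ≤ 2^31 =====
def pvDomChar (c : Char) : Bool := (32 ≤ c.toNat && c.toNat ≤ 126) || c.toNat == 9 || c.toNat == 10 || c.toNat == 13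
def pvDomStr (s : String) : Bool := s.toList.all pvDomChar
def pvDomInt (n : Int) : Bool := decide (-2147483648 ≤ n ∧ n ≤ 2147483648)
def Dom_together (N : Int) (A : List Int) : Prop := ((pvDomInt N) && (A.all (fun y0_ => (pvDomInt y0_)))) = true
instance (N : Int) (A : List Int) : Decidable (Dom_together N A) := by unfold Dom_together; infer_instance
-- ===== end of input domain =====

-- B replaces A's 100000-slot scatter-counting table by a different algorithm:
-- sort the list and find, with a two-pointer sliding-window sweep, the largest
-- group of elements spanning at most 2 (an alternative of similar cost).


-- ===== PORT A =====
-- loop body of A: counts[a-1] += 1 (guarded by a > 0); counts[a] += 1; counts[a+1] += 1 (guarded by a < 99999)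
def stepA (counts : List Int) (a : Int) : List Int :=
  let c1 := if 0 < a then PySem.List.pySetD counts (a - 1) (PySem.List.pyGetD counts (a - 1) 0 + 1) else counts
  let c2 := PySem.List.pySetD c1 a (PySem.List.pyGetD c1 a 0 + 1)
  if a < 99999 then PySem.List.pySetD c2 (a + 1) (PySem.List.pyGetD c2 (a + 1) 0 + 1) else c2

def together (N : Int) (A : List Int) : Int :=
  let counts := A.foldl stepA (List.replicate 100000 (0 : Int))
  (PySem.List.max? counts (fun x => x)).getD 0   -- max(counts); counts is a non-empty literal-length list, so max? is never none

-- ===== PORT B =====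
-- inner while-loop of B: 'while s[r] - s[l] > 2: l += 1'.  The extra guard l < r only
-- makes the recursion total: Python's loop can never move l past r because the
-- condition at l = r is 0 > 2, false; s[r]/s[l] are in-range indices (l ≤ r < len(s)),
-- so plain getD is exact.
def advance (s : List Int) (r l : Nat) : Nat :=
  if h : l < r ∧ 2 < s.getD r 0 - s.getD l 0 then advance s r (l + 1) else l
termination_by r - l
decreasing_by omega

def together_alt (N : Int) (A : List Int) : Int :=
  let s := PySem.List.sorted A (fun x => x) false
  ((PySem.List.pyRange 0 (s.length : Int) 1).foldl
    (fun (st : Nat × Int) r =>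
      let l := advance s r.toNat st.1
      (l, max st.2 ((r : Int) - (l : Int) + 1))) ((0 : Nat), (0 : Int))).2

-- ===== PRECONDITION & SPEC =====
-- Pre_ restricts to the problem's value range 0 ≤ a ≤ 99999: for a ≥ 100000 or a ≤ -100001 A raises
-- IndexError, and for other negative a both programs' values are accidents of Python's negative-index
-- wraparound which the two realize differently, so neither value is the specified one.
def Pre_together (N : Int) (A : List Int) : Prop := ∀ a ∈ A, 0 ≤ a ∧ a < 100000
instance (N : Int) (A : List Int) : Decidable (Pre_together N A) := by unfold Pre_together; infer_instance

def pvWitness_together : Int × List Int := (5, [1, 2, 2, 99999, 0])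

def Spec_together (N : Int) (A : List Int) (out : Int) : Prop := out = together_alt N A
instance (N : Int) (A : List Int) (out : Int) : Decidable (Spec_together N A out) := by unfold Spec_together; infer_instance

-- ===== CLAIM (what is proved, stated in full; the proofs are below) =====
def Claim_equal_together : Prop := ∀ (N : Int) (A : List Int), Dom_together N A → Pre_together N A → Spec_together N A (together N A)

-- ===== LEMMAS AND PROOFS =====

-- the window sum: number of elements of A equal to j-1, j or j+1
def winSum (A : List Int) (j : Int) : Int :=
  (A.count (j + 1) : Int) + (A.count j : Int) + (A.count (j - 1) : Int)

theorem getD_set_eq (L : List Int) (n j : Nat) (v : Int) :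
    (L.set n v).getD j 0 = if n = j ∧ n < L.length then v else L.getD j 0 := by
  simp only [List.getD_eq_getElem?_getD, List.getElem?_set]
  by_cases h : n = j
  · subst h
    by_cases h2 : n < L.length
    · simp [h2]
    · rw [List.getElem?_eq_none (by omega : L.length ≤ n)]; simp [h2]
  · simp [h]

theorem incrNat (L : List Int) (n : Nat) (hn : n < L.length) (j : Nat) :
    (L.set n (L.getD n 0 + 1)).getD j 0 = L.getD j 0 + if n = j then 1 else 0 := by
  rw [getD_set_eq]
  by_cases h : n = j
  · subst h; rw [if_pos ⟨rfl, hn⟩, if_pos rfl]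
  · rw [if_neg (fun h2 => h h2.1), if_neg h, add_zero]

theorem length_stepA (L : List Int) (a : Int) : (stepA L a).length = L.length := by
  unfold stepA
  split <;> split <;> simp [PySem.List.length_pySetD]

theorem stepA_getD (L : List Int) (a : Int) (ha0 : 0 ≤ a) (ha1 : a < 100000)
    (hL : L.length = 100000) (j : Nat) (hj : j < 100000) :
    (stepA L a).getD j 0 = L.getD j 0 +
      ((if a = (j : Int) + 1 then 1 else 0) + (if a = (j : Int) then 1 else 0) +
        (if a = (j : Int) - 1 then 1 else 0)) := by
  obtain ⟨n, rfl⟩ : ∃ n : Nat, a = (n : Int) := ⟨a.toNat, (Int.toNat_of_nonneg ha0).symm⟩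
  have hn : n < 100000 := by exact_mod_cast ha1
  have e2 : (n:Int) + 1 = ((n+1 : Nat) : Int) := by omega
  unfold stepA
  by_cases hpos : 0 < n
  · have e1 : (n:Int) - 1 = ((n-1 : Nat) : Int) := by omega
    rw [if_pos (show (0:Int) < (n:Int) by omega), e1, e2]
    by_cases hlt : n < 99999
    · rw [if_pos (show (n:Int) < 99999 by omega)]
      simp only [PySem.List.pySetD_natCast, PySem.List.pyGetD_natCast]
      rw [incrNat _ _ (by simp [hL]; omega), incrNat _ _ (by simp [hL]; omega),
          incrNat _ _ (by simp [hL]; omega)]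
      generalize L.getD j 0 = x
      split_ifs <;> omega
    · rw [if_neg (show ¬ (n:Int) < 99999 by omega)]
      simp only [PySem.List.pySetD_natCast, PySem.List.pyGetD_natCast]
      rw [incrNat _ _ (by simp [hL]; omega), incrNat _ _ (by simp [hL]; omega)]
      generalize L.getD j 0 = x
      split_ifs <;> omega
  · rw [if_neg (show ¬ (0:Int) < (n:Int) by omega),
        if_pos (show (n:Int) < 99999 by omega), e2]
    simp only [PySem.List.pySetD_natCast, PySem.List.pyGetD_natCast]
    rw [incrNat _ _ (by simp [hL]; omega), incrNat _ _ (by simp [hL]; omega)]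
    generalize L.getD j 0 = x
    split_ifs <;> omega

theorem foldA_getD (A : List Int) (L : List Int) (hL : L.length = 100000)
    (hA : ∀ a ∈ A, 0 ≤ a ∧ a < 100000) (j : Nat) (hj : j < 100000) :
    (A.foldl stepA L).getD j 0 = L.getD j 0 + winSum A j := by
  induction A generalizing L with
  | nil => simp [winSum]
  | cons a A ih =>
    have ha := hA a (List.mem_cons_self)
    rw [List.foldl_cons,
        ih (stepA L a) (by rw [length_stepA, hL]) (fun b hb => hA b (List.mem_cons_of_mem _ hb)),
        stepA_getD L a ha.1 ha.2 hL j hj]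
    unfold winSum
    simp only [List.count_cons, beq_iff_eq]
    push_cast
    generalize L.getD j 0 = x
    split_ifs <;> omega

theorem foldA_length (A : List Int) (L : List Int) : (A.foldl stepA L).length = L.length := by
  induction A generalizing L with
  | nil => rfl
  | cons a A ih => rw [List.foldl_cons, ih, length_stepA]

theorem getD_replicate_zero (j : Nat) : (List.replicate 100000 (0:Int)).getD j 0 = 0 := by
  rw [List.getD_eq_getElem?_getD, List.getElem?_replicate]
  split <;> rfl

theorem winSum_nonneg (A : List Int) (j : Int) : 0 ≤ winSum A j := by
  unfold winSum; positivity

theorem winSum_perm (s A : List Int) (h : s.Perm A) (j : Int) : winSum s j = winSum A j := by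
  unfold winSum
  rw [h.count_eq, h.count_eq, h.count_eq]

-- ---- the minimal left pointer: least l with s[r] - s[l] ≤ 2 (l = r always qualifies) ----
def Lmin (s : List Int) (r : Nat) : Nat :=
  Nat.find (p := fun l => s.getD r 0 - s.getD l 0 ≤ 2) ⟨r, by omega⟩

theorem Lmin_le_self (s : List Int) (r : Nat) : Lmin s r ≤ r :=
  Nat.find_le (by omega)

theorem Lmin_spec (s : List Int) (r : Nat) : s.getD r 0 - s.getD (Lmin s r) 0 ≤ 2 :=
  Nat.find_spec (p := fun l => s.getD r 0 - s.getD l 0 ≤ 2) ⟨r, by omega⟩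

theorem Lmin_min (s : List Int) (r k : Nat) (hk : k < Lmin s r) :
    2 < s.getD r 0 - s.getD k 0 := by
  have := Nat.find_min (p := fun l => s.getD r 0 - s.getD l 0 ≤ 2) ⟨r, by omega⟩ hk
  omega

theorem Lmin_eq (s : List Int) (r l' : Nat) (h1 : s.getD r 0 - s.getD l' 0 ≤ 2)
    (h2 : ∀ k, k < l' → 2 < s.getD r 0 - s.getD k 0) : Lmin s r = l' := by
  rw [Lmin, Nat.find_eq_iff]
  exact ⟨h1, fun k hk => by have := h2 k hk; omega⟩

-- ---- the while loop reaches exactly the minimal pointer ----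
theorem advance_spec (s : List Int) (r : Nat) : ∀ (l : Nat), l ≤ r →
    l ≤ advance s r l ∧ advance s r l ≤ r ∧
    s.getD r 0 - s.getD (advance s r l) 0 ≤ 2 ∧
    ∀ k, l ≤ k → k < advance s r l → 2 < s.getD r 0 - s.getD k 0 := by
  intro l hlr
  rw [advance]
  split
  · case isTrue h =>
    obtain ⟨ih1, ih2, ih3, ih4⟩ := advance_spec s r (l + 1) h.1
    refine ⟨by omega, ih2, ih3, ?_⟩
    intro k hk1 hk2
    rcases Nat.eq_or_lt_of_le hk1 with he | hlt
    · rw [← he]; exact h.2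
    · exact ih4 k hlt hk2
  · case isFalse h =>
    refine ⟨le_refl l, hlr, ?_, fun k hk1 hk2 => by omega⟩
    by_cases hl : l < r
    · have h2 : ¬ 2 < s.getD r 0 - s.getD l 0 := fun hc => h ⟨hl, hc⟩
      omega
    · have : l = r := by omega
      rw [this]; omega
termination_by l => r - l
decreasing_by omega

theorem advance_eq_Lmin (s : List Int) (r l : Nat) (hlr : l ≤ r)
    (hpre : ∀ k, k < l → 2 < s.getD r 0 - s.getD k 0) : advance s r l = Lmin s r := by
  obtain ⟨h1, _, h3, h4⟩ := advance_spec s r l hlr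
  exact (Lmin_eq s r (advance s r l) h3 (fun k hk => by
    by_cases hkl : k < l
    · exact hpre k hkl
    · exact h4 k (by omega) hk)).symm

-- ---- the sweep as a running max of window sizes ----
def szf (s : List Int) (r : Nat) : Int := (r : Int) - (Lmin s r : Int) + 1

def bsizes (s : List Int) (m : Nat) : Int :=
  (List.range m).foldl (fun b r => max b (szf s r)) 0

theorem foldl_maxf_init (f : Nat → Int) (xs : List Nat) : ∀ (b : Int),
    b ≤ xs.foldl (fun b r => max b (f r)) b := by
  induction xs with
  | nil => intro b; simp
  | cons y t ih =>
    intro b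
    calc b ≤ max b (f y) := le_max_left _ _
    _ ≤ _ := ih (max b (f y))

theorem foldl_maxf_le (f : Nat → Int) (xs : List Nat) : ∀ (b : Int) (x : Nat), x ∈ xs →
    f x ≤ xs.foldl (fun b r => max b (f r)) b := by
  induction xs with
  | nil => intro b x hx; simp at hx
  | cons y t ih =>
    intro b x hx
    rw [List.foldl_cons]
    rcases List.mem_cons.1 hx with he | hm
    · subst he
      calc f x ≤ max b (f x) := le_max_right _ _
      _ ≤ _ := foldl_maxf_init f t _
    · exact ih _ x hm

theorem foldl_maxf_cases (f : Nat → Int) (xs : List Nat) : ∀ (b : Int),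
    xs.foldl (fun b r => max b (f r)) b = b ∨ ∃ x ∈ xs, xs.foldl (fun b r => max b (f r)) b = f x := by
  induction xs with
  | nil => intro b; left; rfl
  | cons y t ih =>
    intro b
    rw [List.foldl_cons]
    rcases ih (max b (f y)) with h | ⟨x, hx, hex⟩
    · rcases max_choice b (f y) with hc | hc
      · left; rw [h, hc]
      · right; exact ⟨y, List.mem_cons_self, by rw [h, hc]⟩
    · right; exact ⟨x, List.mem_cons_of_mem _ hx, hex⟩

theorem loop_char (s : List Int)
    (hmono : ∀ p q : Nat, p ≤ q → q < s.length → s.getD p 0 ≤ s.getD q 0) :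
    ∀ m : Nat, m ≤ s.length →
    (List.range m).foldl
      (fun (st : Nat × Int) r =>
        let l := advance s r st.1
        (l, max st.2 ((r : Int) - (l : Int) + 1))) ((0 : Nat), (0 : Int))
    = ((if m = 0 then 0 else Lmin s (m - 1)), bsizes s m) := by
  intro m
  induction m with
  | zero => intro _; simp [bsizes]
  | succ m ih =>
    intro hm
    rw [List.range_succ, List.foldl_append, ih (by omega), List.foldl_cons, List.foldl_nil]
    have hadv : advance s m (if m = 0 then 0 else Lmin s (m - 1)) = Lmin s m := by
      by_cases hm0 : m = 0
      · subst hm0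
        exact advance_eq_Lmin s 0 0 (le_refl _) (fun k hk => by omega)
      · rw [if_neg hm0]
        refine advance_eq_Lmin s m (Lmin s (m - 1)) (by have := Lmin_le_self s (m - 1); omega) ?_
        intro k hk
        have h1 := Lmin_min s (m - 1) k hk
        have h2 := hmono (m - 1) m (by omega) (by omega)
        omega
    simp only [hadv]
    rw [if_neg (Nat.succ_ne_zero m), Nat.add_sub_cancel]
    rw [show bsizes s (m + 1) = max (bsizes s m) (szf s m) from by
      rw [bsizes, bsizes, List.range_succ, List.foldl_append, List.foldl_cons, List.foldl_nil]]
    rfl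

-- ---- counting an interval of three integers ----
theorem count3 (l : List Int) (j : Int) :
    (l.filter (fun x => decide (j - 1 ≤ x) && decide (x ≤ j + 1))).length
      = l.count (j + 1) + l.count j + l.count (j - 1) := by
  induction l with
  | nil => rfl
  | cons x t ih =>
    simp only [List.filter_cons, List.count_cons, beq_iff_eq]
    by_cases h : j - 1 ≤ x ∧ x ≤ j + 1
    · rw [if_pos (by simp [h.1, h.2]), List.length_cons, ih]
      have : x = j + 1 ∨ x = j ∨ x = j - 1 := by omega
      rcases this with h1 | h1 | h1 <;> subst h1 <;> split_ifs <;> omega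
    · rw [if_neg (by simpa using fun h1 h2 => h ⟨h1, h2⟩), ih]
      split_ifs <;> omega

theorem winSum_eq_filter (l : List Int) (j : Int) :
    winSum l j = ((l.filter (fun x => decide (j - 1 ≤ x) && decide (x ≤ j + 1))).length : Int) := by
  rw [winSum, count3]; push_cast; ring

-- ---- sorted split lemmas ----
theorem filter_ge_eq_drop (s : List Int) (hs : s.Pairwise (· ≤ ·)) (a : Int) :
    s.filter (fun x => decide (a ≤ x)) = s.drop (s.countP (fun x => decide (x < a))) := by
  induction s with
  | nil => rfl
  | cons x t ih =>
    rw [List.pairwise_cons] at hs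
    rw [List.filter_cons, List.countP_cons]
    by_cases hxa : a ≤ x
    · rw [if_pos (by simpa using hxa), if_neg (by simpa using hxa), Nat.add_zero]
      have ht : t.filter (fun x => decide (a ≤ x)) = t :=
        List.filter_eq_self.2 (fun y hy => by simpa using le_trans hxa (hs.1 y hy))
      have hc : t.countP (fun x => decide (x < a)) = 0 :=
        List.countP_eq_zero.2 (fun y hy => by simpa using le_trans hxa (hs.1 y hy))
      rw [ht, hc, List.drop_zero]
    · rw [if_neg (by simpa using hxa), if_pos (by simpa using by omega : (decide (x < a)) = true),
          ih hs.2]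
      rfl
  
theorem filter_le_eq_take (s : List Int) (hs : s.Pairwise (· ≤ ·)) (b : Int) :
    s.filter (fun x => decide (x ≤ b)) = s.take (s.countP (fun x => decide (x ≤ b))) := by
  induction s with
  | nil => rfl
  | cons x t ih =>
    rw [List.pairwise_cons] at hs
    rw [List.filter_cons, List.countP_cons]
    by_cases hxb : x ≤ b
    · rw [if_pos (by simpa using hxb), if_pos (by simpa using hxb), ih hs.2]
      rfl
    · rw [if_neg (by simpa using hxb), if_neg (by simpa using hxb), Nat.add_zero]
      have ht : t.filter (fun x => decide (x ≤ b)) = [] :=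
        List.filter_eq_nil_iff.2 (fun y hy => by
          simpa using by have := hs.1 y hy; omega)
      have hc : t.countP (fun x => decide (x ≤ b)) = 0 :=
        List.countP_eq_zero.2 (fun y hy => by
          simpa using by have := hs.1 y hy; omega)
      rw [ht, hc, List.take_zero]

-- (1) every window of the sweep is counted by some winSum slot
theorem szf_le_winSum (s : List Int)
    (hmono : ∀ p q : Nat, p ≤ q → q < s.length → s.getD p 0 ≤ s.getD q 0)
    (hbound : ∀ x ∈ s, 0 ≤ x ∧ x ≤ 99999)
    (r : Nat) (hr : r < s.length) :
    szf s r ≤ winSum s ((s.getD r 0 - 1).toNat) := by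
  set j : Int := ((s.getD r 0 - 1).toNat : Int) with hj
  have hjmax : j = max (s.getD r 0 - 1) 0 := Int.toNat_eq_max _
  set l0 := Lmin s r with hl0
  have hl0r : l0 ≤ r := Lmin_le_self s r
  set slice := (s.drop l0).take (r - l0 + 1) with hslice
  have hlen : slice.length = r - l0 + 1 := by
    rw [hslice, List.length_take, List.length_drop]
    omega
  have hsub : slice.Sublist s := ((s.drop l0).take_sublist _).trans (s.drop_sublist l0)
  have helem : ∀ x ∈ slice, (decide (j - 1 ≤ x) && decide (x ≤ j + 1)) = true := by
    intro x hx
    obtain ⟨i, hi, hix⟩ := List.mem_iff_getElem.1 hx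
    have hi2 : i < r - l0 + 1 := by omega
    have hidx : l0 + i < s.length := by omega
    have hxval : x = s[l0 + i]'hidx := by
      rw [← hix]
      simp only [hslice, List.getElem_take, List.getElem_drop]
    have hge : s.getD l0 0 ≤ x := by
      rw [hxval, ← List.getD_eq_getElem s 0 hidx]
      exact hmono l0 (l0 + i) (by omega) hidx
    have hle : x ≤ s.getD r 0 := by
      rw [hxval, ← List.getD_eq_getElem s 0 hidx]
      exact hmono (l0 + i) r (by omega) hr
    have hx0 : 0 ≤ x := (hbound x (hsub.mem hx)).1
    have hspread := Lmin_spec s r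
    rw [← hl0] at hspread
    simp only [Bool.and_eq_true, decide_eq_true_eq]
    omega
  have hfself : slice.filter (fun x => decide (j - 1 ≤ x) && decide (x ≤ j + 1)) = slice :=
    List.filter_eq_self.2 helem
  have hlenle : slice.length ≤ (s.filter (fun x => decide (j - 1 ≤ x) && decide (x ≤ j + 1))).length := by
    have := (hsub.filter (fun x => decide (j - 1 ≤ x) && decide (x ≤ j + 1))).length_le
    rw [hfself] at this
    exact this
  rw [winSum_eq_filter, szf, ← hl0]
  rw [hlen] at hlenle
  omega

-- (2) every winSum slot is bounded by some window of the sweep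
theorem winSum_le_bsizes (s : List Int) (hs : s.Pairwise (· ≤ ·)) (j : Int) :
    winSum s j ≤ bsizes s s.length := by
  set P : Int → Bool := fun x => decide (j - 1 ≤ x) && decide (x ≤ j + 1) with hP
  set K := (s.filter P).length with hK
  rw [winSum_eq_filter, ← hP, ← hK]
  rcases Nat.eq_zero_or_pos K with hK0 | hKpos
  · rw [hK0]
    exact_mod_cast foldl_maxf_init (szf s) (List.range s.length) 0
  · set lo := s.countP (fun x => decide (x < j - 1)) with hlo
    have hdropsorted : (s.drop lo).Pairwise (· ≤ ·) := hs.sublist (s.drop_sublist lo)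
    have hsplit : s.filter P = (s.drop lo).take ((s.drop lo).countP (fun x => decide (x ≤ j + 1))) := by
      have h1 : s.filter P = (s.filter (fun x => decide (j - 1 ≤ x))).filter (fun x => decide (x ≤ j + 1)) := by
        rw [List.filter_filter]
        exact List.filter_congr (fun x _ => by simp [hP, Bool.and_comm])
      rw [h1, filter_ge_eq_drop s hs (j - 1), ← hlo, filter_le_eq_take _ hdropsorted]
    have hKc : K = (s.drop lo).countP (fun x => decide (x ≤ j + 1)) := by
      have hcle := List.countP_le_length (l := s.drop lo) (p := fun x => decide (x ≤ j + 1))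
      rw [hK, hsplit, List.length_take, List.length_drop]
      rw [List.length_drop] at hcle
      omega
    have hF : s.filter P = (s.drop lo).take K := by rw [hsplit, ← hKc]
    have hKle : K ≤ s.length - lo := by
      rw [hKc]
      have := List.countP_le_length (l := s.drop lo) (p := fun x => decide (x ≤ j + 1))
      rw [List.length_drop] at this
      exact this
    have hlolen : lo ≤ s.length := by
      rw [hlo]; exact List.countP_le_length
    have hr0 : lo + (K - 1) < s.length := by omega
    -- first and last element of the filtered block
    have hgetF : ∀ i, ∀ _ : i < K, s[lo + i]'(by omega) ∈ s.filter P := by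
      intro i hi
      have hiF : i < (s.filter P).length := by rw [← hK]; exact hi
      have : (s.filter P)[i]'hiF = s[lo + i]'(by omega) := by
        simp only [hF]
        rw [List.getElem_take, List.getElem_drop]
      rw [← this]
      exact List.getElem_mem _
    have h0 := List.of_mem_filter (hgetF 0 hKpos)
    have hK1 := List.of_mem_filter (hgetF (K - 1) (by omega))
    simp only [hP, Bool.and_eq_true, decide_eq_true_eq] at h0 hK1
    have hg0 : s.getD lo 0 = s[lo + 0]'(by omega) := by
      rw [List.getD_eq_getElem s 0 (by omega)]
      simp
    have hgK : s.getD (lo + (K - 1)) 0 = s[lo + (K - 1)]'(by omega) :=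
      List.getD_eq_getElem s 0 hr0
    have hLle : Lmin s (lo + (K - 1)) ≤ lo := by
      apply Nat.find_le
      rw [hgK, hg0]
      simp only [Nat.add_zero] at *
      omega
    have hsz : (K : Int) ≤ szf s (lo + (K - 1)) := by
      rw [szf]
      have : (Lmin s (lo + (K - 1)) : Int) ≤ (lo : Int) := by exact_mod_cast hLle
      push_cast
      omega
    calc (K : Int) ≤ szf s (lo + (K - 1)) := hsz
    _ ≤ bsizes s s.length := foldl_maxf_le (szf s) (List.range s.length) 0 _ (List.mem_range.2 hr0)

set_option maxRecDepth 4096 in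
theorem main_eq (N : Int) (A : List Int) (hPre : ∀ a ∈ A, 0 ≤ a ∧ a < 100000) :
    together N A = together_alt N A := by
  -- ---- A's value: max of the 100000 window sums ----
  rw [show together N A
      = (PySem.List.max? (A.foldl stepA (List.replicate 100000 (0 : Int))) (fun x => x)).getD 0 from rfl]
  set counts := A.foldl stepA (List.replicate 100000 (0 : Int)) with hc
  have hclen : counts.length = 100000 := by
    rw [hc, foldA_length, List.length_replicate]
  have hcget : ∀ k : Nat, (hk : k < counts.length) → counts[k] = winSum A k := by
    intro k hk
    have hk' : k < 100000 := by omega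
    rw [← List.getD_eq_getElem counts 0 hk, hc,
        foldA_getD A _ (List.length_replicate ..) hPre k hk', getD_replicate_zero, zero_add]
  have hne : counts ≠ [] := by
    intro h; rw [h] at hclen; simp at hclen
  obtain ⟨M, hM⟩ : ∃ M, PySem.List.max? counts (fun x => x) = some M := by
    cases hmax : PySem.List.max? counts (fun x => x) with
    | none => exact absurd ((PySem.List.max?_eq_none_iff _ _).1 hmax) hne
    | some M => exact ⟨M, rfl⟩
  rw [hM, Option.getD_some]
  have hMmem : ∃ j0 : Nat, j0 < 100000 ∧ M = winSum A j0 := by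
    have hm := PySem.List.max?_mem hM
    obtain ⟨k, hk, hke⟩ := List.mem_iff_getElem.1 hm
    exact ⟨k, by omega, by rw [← hke, hcget k hk]⟩
  have hMub : ∀ k : Nat, k < 100000 → winSum A k ≤ M := by
    intro k hk
    have hkc : k < counts.length := by omega
    have := PySem.List.max?_isMax hM counts[k] (List.getElem_mem hkc)
    rw [hcget k hkc] at this
    exact this
  -- ---- B's value: max window size of the two-pointer sweep ----
  rw [show together_alt N A
      = ((PySem.List.pyRange 0 ((PySem.List.sorted A (fun x => x) false).length : Int) 1).foldl
          (fun (st : Nat × Int) r =>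
            let l := advance (PySem.List.sorted A (fun x => x) false) r.toNat st.1
            (l, max st.2 ((r : Int) - (l : Int) + 1))) ((0 : Nat), (0 : Int))).2 from rfl]
  set s := PySem.List.sorted A (fun x => x) false with hsdef
  have hperm : s.Perm A := PySem.List.sorted_perm A _ _
  have hpair : s.Pairwise (· ≤ ·) := PySem.List.sorted_pairwise A _
  have hmono : ∀ p q : Nat, p ≤ q → q < s.length → s.getD p 0 ≤ s.getD q 0 := by
    intro p q hpq hq
    rcases Nat.eq_or_lt_of_le hpq with he | hlt
    · rw [he]
    · rw [List.getD_eq_getElem s 0 (by omega), List.getD_eq_getElem s 0 hq]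
      exact (List.pairwise_iff_getElem.1 hpair) p q (by omega) hq hlt
  have hbound : ∀ x ∈ s, 0 ≤ x ∧ x ≤ 99999 := by
    intro x hx
    have := hPre x (hperm.mem_iff.1 hx)
    omega
  have hfold :
      ((PySem.List.pyRange 0 (s.length : Int) 1).foldl
        (fun (st : Nat × Int) r =>
          let l := advance s r.toNat st.1
          (l, max st.2 ((r : Int) - (l : Int) + 1))) ((0 : Nat), (0 : Int))).2
      = bsizes s s.length := by
    rw [PySem.List.pyRange_zero_natCast, List.foldl_map]
    have := loop_char s hmono s.length (le_refl _)
    simp only [Int.toNat_natCast] at this ⊢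
    rw [this]
  rw [hfold]
  -- ---- the two maxima agree ----
  apply le_antisymm
  · obtain ⟨j0, _, hMe⟩ := hMmem
    rw [hMe, ← winSum_perm s A hperm]
    exact winSum_le_bsizes s hpair _
  · rcases foldl_maxf_cases (szf s) (List.range s.length) 0 with h0 | ⟨r, hr, hre⟩
    · rw [show bsizes s s.length = (List.range s.length).foldl (fun b r => max b (szf s r)) 0 from rfl, h0]
      obtain ⟨j0, _, hMe⟩ := hMmem
      rw [hMe]
      exact winSum_nonneg A _
    · have hrn : r < s.length := List.mem_range.1 hr
      have h1 := szf_le_winSum s hmono hbound r hrn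
      have hjb : (s.getD r 0 - 1).toNat < 100000 := by
        have hx : s.getD r 0 ≤ 99999 := by
          rw [List.getD_eq_getElem s 0 hrn]
          exact (hbound _ (List.getElem_mem hrn)).2
        omega
      have h2 := hMub ((s.getD r 0 - 1).toNat) hjb
      rw [winSum_perm s A hperm] at h1
      rw [show bsizes s s.length = (List.range s.length).foldl (fun b r => max b (szf s r)) 0 from rfl, hre]
      exact le_trans h1 h2

-- ===== VERDICT (by name: the statement is the Claim_ definition above) =====
theorem together_spec : Claim_equal_together := by
  intro N A _ hPre
  unfold Spec_together
  exact main_eq N A hPre
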